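-- pv_equiv track=rewrite | github.com/UA-1183-PythonFundamentals/ua1183pf_hw | hw/hw03/Yenot52/Yenot52 hw3.py | analyze_number
-- ===== SOURCE A (Python) =====
-- def analyze_number(number):
--   """Analyzes a four-digital integer.
--   Args:
--       number: A four-digit integer
--
--   Returns:
--       A tuple containing:
--           - The product of the digits.
--           - The number in reverse order.
--           - The digits serted in ascending order.
--   """
--   if not (1000 <= number <= 9999):
--     raise ValueError("Input must be a four-digital number")
--
--   digits = [int(d) for d in str(number)]
--
--   product = 1
--   for digit in digits:
--     product *= digit
--
--   #2.2 and 2.3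
--
--   reversed_number = int(str(number)[::-1])
--
--   sorted_digits = sorted(digits)
--
--   return product, reversed_number, sorted_digits
-- ===== SOURCE B (Python) =====
-- def analyze_number(number):
--     """Same contract as A, but extracts digits arithmetically with divmod:
--     one loop accumulates the product, builds the reversed number as
--     rev = rev*10 + d, and collects the digits; no string conversion."""
--     if not (1000 <= number <= 9999):
--         raise ValueError("Input must be a four-digital number")
--     n = number
--     product = 1
--     rev = 0
--     digits = []
--     while n > 0:
--         n, d = divmod(n, 10)
--         product *= d
--         rev = rev * 10 + d
--         digits.append(d)
--     digits.sort()
--     return product, rev, digits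
-- ===== Notes on version B (the rewrite author's own statement) =====
-- stated objective: idiomatic
-- what changed: Digits are extracted arithmetically in one divmod loop that simultaneously accumulates the product, builds the reversed number by shift-and-add, and collects the digits, replacing A's string conversion, string slicing and re-parsing.
import Mathlib
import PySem

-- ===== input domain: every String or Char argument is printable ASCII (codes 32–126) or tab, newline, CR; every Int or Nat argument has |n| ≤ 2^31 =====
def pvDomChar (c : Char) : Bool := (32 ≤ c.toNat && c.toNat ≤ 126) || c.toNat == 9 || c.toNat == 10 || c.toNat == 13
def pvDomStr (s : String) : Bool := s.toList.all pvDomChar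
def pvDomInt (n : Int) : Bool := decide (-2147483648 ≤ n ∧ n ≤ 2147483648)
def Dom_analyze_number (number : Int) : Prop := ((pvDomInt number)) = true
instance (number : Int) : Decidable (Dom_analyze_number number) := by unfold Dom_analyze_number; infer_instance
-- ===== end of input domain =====

-- B replaces A's string conversion/slicing/re-parsing by one arithmetic divmod loop; A raises ValueError outside 1000..9999, excluded by Pre_.

-- ===== PORT A =====
-- digits = [int(d) for d in str(number)]; inside Pre_ every char of str(number) is a digit, so int(d) = ofChars? [c] and the getD 0 default never fires
def analyze_number (number : Int) : Int × Int × List Int :=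
  let digits := (PySem.Int.toChars number).map (fun c => (PySem.Int.ofChars? [c]).getD 0)
  let product := digits.foldl (fun p d => p * d) 1
  -- str(number)[::-1] reverses the char list; int(...) = ofChars?, total inside Pre_ (a non-empty digit string)
  let reversed_number := (PySem.Int.ofChars? ((PySem.Int.toChars number).reverse)).getD 0
  let sorted_digits := PySem.List.sorted digits (fun x => x) false
  (product, reversed_number, sorted_digits)

-- ===== PORT B =====
-- the while loop of Source B: n, d = divmod(n, 10); product *= d; rev = rev*10 + d; digits.append(d)
-- fuel = n.toNat is a totality guard only: n strictly decreases while staying nonnegative, so fuel never runs out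
def analyzeLoopB (fuel : Nat) (n product rev : Int) (digits : List Int) : Int × Int × List Int :=
  match fuel with
  | 0 => (product, rev, digits)
  | fuel + 1 =>
    if 0 < n then
      let d := PySem.Int.mod n 10
      analyzeLoopB fuel (PySem.Int.floordiv n 10) (product * d) (rev * 10 + d) (digits ++ [d])
    else
      (product, rev, digits)

def analyze_number_alt (number : Int) : Int × Int × List Int :=
  let r := analyzeLoopB number.toNat number 1 0 []
  (r.1, r.2.1, PySem.List.sorted r.2.2 (fun x => x) false)

-- ===== PRECONDITION & SPEC =====
-- Pre_ excludes exactly the inputs on which A raises ValueError (number not in 1000..9999)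
def Pre_analyze_number (number : Int) : Prop := 1000 ≤ number ∧ number ≤ 9999
instance (number : Int) : Decidable (Pre_analyze_number number) := by unfold Pre_analyze_number; infer_instance
def pvWitness_analyze_number : Int := (1729)

def Spec_analyze_number (number : Int) (out : Int × Int × List Int) : Prop := out = analyze_number_alt number
instance (number : Int) (out : Int × Int × List Int) : Decidable (Spec_analyze_number number out) := by unfold Spec_analyze_number; infer_instance

-- ===== CLAIM (what is proved, stated in full; the proofs are below) =====
def Claim_equal_analyze_number : Prop := ∀ (number : Int), Dom_analyze_number number → Pre_analyze_number number → Spec_analyze_number number (analyze_number number)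

-- ===== LEMMAS AND PROOFS =====

-- one step of Nat.toDigitsCore with positive fuel
theorem toDigitsCore_succ (f n : Nat) (ds : List Char) :
    Nat.toDigitsCore 10 (f + 1) n ds =
      if n / 10 = 0 then (n % 10).digitChar :: ds
      else Nat.toDigitsCore 10 f (n / 10) ((n % 10).digitChar :: ds) := by
  conv_lhs => rw [Nat.toDigitsCore]

-- str(N) for a four-digit N, digit by digit
theorem toDigits_four (a b c d : Nat) (ha1 : 1 ≤ a) (ha : a < 10) (hb : b < 10) (hc : c < 10) (hd : d < 10) :
    Nat.toDigits 10 (1000 * a + 100 * b + 10 * c + d) =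
      [a.digitChar, b.digitChar, c.digitChar, d.digitChar] := by
  set N := 1000 * a + 100 * b + 10 * c + d with hN
  unfold Nat.toDigits
  obtain ⟨f, hf⟩ : ∃ f, N + 1 = f + 1 + 1 + 1 + 1 := ⟨N - 3, by omega⟩
  rw [hf, toDigitsCore_succ, if_neg (by omega), show N / 10 = 100 * a + 10 * b + c by omega,
    show N % 10 = d by omega,
    toDigitsCore_succ, if_neg (by omega), show (100 * a + 10 * b + c) / 10 = 10 * a + b by omega,
    show (100 * a + 10 * b + c) % 10 = c by omega,
    toDigitsCore_succ, if_neg (by omega), show (10 * a + b) / 10 = a by omega,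
    show (10 * a + b) % 10 = b by omega,
    toDigitsCore_succ, if_pos (by omega), show a % 10 = a by omega]

-- int(d) on one decimal digit character
theorem ofChars_one_digit : ∀ k : Nat, k < 10 →
    PySem.Int.ofChars? [k.digitChar] = some (k : Int) := by decide

-- int(s) on four decimal digit characters (leading zeros allowed, as in Python)
set_option maxRecDepth 40000 in
theorem ofChars_four_digits : ∀ p : Nat, p < 10 → ∀ q : Nat, q < 10 → ∀ r : Nat, r < 10 → ∀ s : Nat, s < 10 →
    PySem.Int.ofChars? [p.digitChar, q.digitChar, r.digitChar, s.digitChar]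
      = some ((((p : Int) * 10 + q) * 10 + r) * 10 + s) := by decide

-- one iteration of Source B's while loop (fuel positive, n positive)
theorem analyzeLoopB_succ (f : Nat) (n p r : Int) (ds : List Int) (hf : 0 < f) (hn : 0 < n) :
    analyzeLoopB f n p r ds =
      analyzeLoopB (f - 1) (PySem.Int.floordiv n 10) (p * PySem.Int.mod n 10)
        (r * 10 + PySem.Int.mod n 10) (ds ++ [PySem.Int.mod n 10]) := by
  cases f with
  | zero => omega
  | succ f => simp [analyzeLoopB, hn]

-- the loop exits as soon as n = 0, whatever fuel is left
theorem analyzeLoopB_zero (f : Nat) (p r : Int) (ds : List Int) :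
    analyzeLoopB f 0 p r ds = (p, r, ds) := by
  cases f <;> simp [analyzeLoopB]

-- mod/floordiv of a nonneg cast by 10, in omega-friendly form
theorem mod_cast10 (m : Nat) : PySem.Int.mod (m : Int) 10 = (m : Int) % 10 :=
  PySem.Int.mod_eq_emod_of_pos (by omega)
theorem floordiv_cast10 (m : Nat) : PySem.Int.floordiv (m : Int) 10 = (m : Int) / 10 :=
  PySem.Int.floordiv_eq_ediv_of_pos (by omega)

-- the whole equivalence, with the four digits abstracted
theorem analyze_eq_of_digits (a b c d : Nat) (ha1 : 1 ≤ a) (ha : a < 10) (hb : b < 10) (hc : c < 10) (hd : d < 10) :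
    analyze_number ((1000 * a + 100 * b + 10 * c + d : Nat) : Int)
      = analyze_number_alt ((1000 * a + 100 * b + 10 * c + d : Nat) : Int) := by
  set N := 1000 * a + 100 * b + 10 * c + d with hN
  -- A side: str(N) is the four digit chars
  have hchars : PySem.Int.toChars (N : Int) = [a.digitChar, b.digitChar, c.digitChar, d.digitChar] := by
    unfold PySem.Int.toChars
    rw [if_neg (by omega)]
    simpa using toDigits_four a b c d ha1 ha hb hc hd
  -- B side: unfold the four loop iterations
  have hfuel : (N : Int).toNat = N := Int.toNat_natCast N
  have hB : analyzeLoopB N (N : Int) 1 0 [] =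
      ((1 * d * c * b * a : Int), (((0 * 10 + (d : Int)) * 10 + c) * 10 + b) * 10 + a,
        [(d : Int), c, b, a]) := by
    rw [analyzeLoopB_succ _ _ _ _ _ (by omega) (by exact_mod_cast (by omega : (0:Int) < (N:Int)))]
    rw [mod_cast10, floordiv_cast10,
      show ((N : Int)) % 10 = (d : Int) by omega,
      show ((N : Int)) / 10 = ((100 * a + 10 * b + c : Nat) : Int) by push_cast; omega]
    rw [analyzeLoopB_succ _ _ _ _ _ (by omega) (by push_cast; omega)]
    rw [mod_cast10, floordiv_cast10,
      show (((100 * a + 10 * b + c : Nat) : Int)) % 10 = (c : Int) by push_cast; omega,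
      show (((100 * a + 10 * b + c : Nat) : Int)) / 10 = ((10 * a + b : Nat) : Int) by push_cast; omega]
    rw [analyzeLoopB_succ _ _ _ _ _ (by omega) (by push_cast; omega)]
    rw [mod_cast10, floordiv_cast10,
      show (((10 * a + b : Nat) : Int)) % 10 = (b : Int) by push_cast; omega,
      show (((10 * a + b : Nat) : Int)) / 10 = ((a : Nat) : Int) by push_cast; omega]
    rw [analyzeLoopB_succ _ _ _ _ _ (by omega) (by omega)]
    rw [mod_cast10, floordiv_cast10,
      show (((a : Nat) : Int)) % 10 = (a : Int) by omega,
      show (((a : Nat) : Int)) / 10 = (0 : Int) by omega]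
    rw [analyzeLoopB_zero]
    simp
  unfold analyze_number analyze_number_alt
  rw [hchars, hfuel, hB]
  simp only [List.map, List.reverse_cons, List.reverse_nil, List.nil_append, List.cons_append,
    List.foldl,
    ofChars_one_digit a (by omega), ofChars_one_digit b (by omega),
    ofChars_one_digit c (by omega), ofChars_one_digit d (by omega),
    ofChars_four_digits d (by omega) c (by omega) b (by omega) a (by omega),
    Option.getD_some]
  refine Prod.ext (by ring) (Prod.ext (by ring) ?_)
  exact PySem.List.sorted_eq_sorted_of_perm _ _ _ (fun _ _ h => h)
    ((List.reverse_perm [(a : Int), b, c, d]).symm)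

-- ===== VERDICT (by name: the statement is the Claim_ definition above) =====
theorem analyze_number_spec : Claim_equal_analyze_number := by
  intro number _ hpre
  obtain ⟨h1, h2⟩ := hpre
  unfold Spec_analyze_number
  have key := analyze_eq_of_digits (number.toNat / 1000) (number.toNat / 100 % 10)
    (number.toNat / 10 % 10) (number.toNat % 10)
    (by omega) (by omega) (by omega) (by omega) (by omega)
  have hrepr : ((1000 * (number.toNat / 1000) + 100 * (number.toNat / 100 % 10)
      + 10 * (number.toNat / 10 % 10) + number.toNat % 10 : Nat) : Int) = number := by
    push_cast; omega
  rwa [hrepr] at key
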